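-- pv_equiv track=rewrite | github.com/minaCod3/emotional-journal-mvp | utils/sentiment_analyzer_lite.py | _detect_emotions_from_keywords
-- ===== SOURCE A (Python) =====
-- from typing import Dict, List
--
-- def _detect_emotions_from_keywords(text: str, sentiment_label: str) -> List[str]:
--     """
--     Detect emotions based on keywords (simple rule-based approach)
--
--     Args:
--         text: Text to analyze
--         sentiment_label: Overall sentiment label
--
--     Returns:
--         List of detected emotions
--     """
--     text_lower = text.lower()
--
--     emotion_keywords = {
--         'joy': ['happy', 'joy', 'excited', 'wonderful', 'amazing', 'great', 'love', 'fantastic', 'delighted', 'thrilled'],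
--         'sadness': ['sad', 'depressed', 'unhappy', 'down', 'crying', 'tears', 'lonely', 'miss', 'disappointed', 'heartbroken'],
--         'anger': ['angry', 'mad', 'furious', 'annoyed', 'frustrated', 'irritated', 'hate', 'rage', 'outraged'],
--         'fear': ['afraid', 'scared', 'anxious', 'worried', 'nervous', 'panic', 'terrified', 'frightened'],
--         'surprise': ['surprised', 'shocked', 'amazed', 'unexpected', 'sudden', 'wow', 'astonished'],
--         'gratitude': ['grateful', 'thankful', 'appreciate', 'blessed', 'lucky', 'fortunate', 'thanks'],
--         'hope': ['hope', 'optimistic', 'looking forward', 'excited about', 'can\'t wait', 'hopeful'],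
--         'stress': ['stressed', 'overwhelmed', 'pressure', 'burden', 'exhausted', 'tired', 'burned out']
--     }
--
--     detected = []
--     emotion_scores = {}
--
--     for emotion, keywords in emotion_keywords.items():
--         count = sum(1 for keyword in keywords if keyword in text_lower)
--         if count > 0:
--             emotion_scores[emotion] = count
--
--     # Sort by count and take top 3
--     if emotion_scores:
--         sorted_emotions = sorted(emotion_scores.items(), key=lambda x: x[1], reverse=True)
--         detected = [emotion for emotion, _ in sorted_emotions[:3]]
--
--     # If no specific emotions detected, infer from sentiment
--     if not detected:
--         if sentiment_label == "POSITIVE":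
--             detected.append('joy')
--         elif sentiment_label == "NEGATIVE":
--             detected.append('sadness')
--         else:
--             detected.append('neutral')
--
--     return detected
-- ===== SOURCE B (Python) =====
-- from typing import Dict, List
--
-- def _detect_emotions_from_keywords(text: str, sentiment_label: str) -> List[str]:
--     """Flat (emotion, keyword) pair list tallied into a counter dict, then a
--     counting-sort bucket scan (counts are at most 10) selects the top 3 without sorting."""
--     text_lower = text.lower()
--
--     pairs = [
--         ('joy', 'happy'),
--         ('joy', 'joy'),
--         ('joy', 'excited'),
--         ('joy', 'wonderful'),
--         ('joy', 'amazing'),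
--         ('joy', 'great'),
--         ('joy', 'love'),
--         ('joy', 'fantastic'),
--         ('joy', 'delighted'),
--         ('joy', 'thrilled'),
--         ('sadness', 'sad'),
--         ('sadness', 'depressed'),
--         ('sadness', 'unhappy'),
--         ('sadness', 'down'),
--         ('sadness', 'crying'),
--         ('sadness', 'tears'),
--         ('sadness', 'lonely'),
--         ('sadness', 'miss'),
--         ('sadness', 'disappointed'),
--         ('sadness', 'heartbroken'),
--         ('anger', 'angry'),
--         ('anger', 'mad'),
--         ('anger', 'furious'),
--         ('anger', 'annoyed'),
--         ('anger', 'frustrated'),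
--         ('anger', 'irritated'),
--         ('anger', 'hate'),
--         ('anger', 'rage'),
--         ('anger', 'outraged'),
--         ('fear', 'afraid'),
--         ('fear', 'scared'),
--         ('fear', 'anxious'),
--         ('fear', 'worried'),
--         ('fear', 'nervous'),
--         ('fear', 'panic'),
--         ('fear', 'terrified'),
--         ('fear', 'frightened'),
--         ('surprise', 'surprised'),
--         ('surprise', 'shocked'),
--         ('surprise', 'amazed'),
--         ('surprise', 'unexpected'),
--         ('surprise', 'sudden'),
--         ('surprise', 'wow'),
--         ('surprise', 'astonished'),
--         ('gratitude', 'grateful'),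
--         ('gratitude', 'thankful'),
--         ('gratitude', 'appreciate'),
--         ('gratitude', 'blessed'),
--         ('gratitude', 'lucky'),
--         ('gratitude', 'fortunate'),
--         ('gratitude', 'thanks'),
--         ('hope', 'hope'),
--         ('hope', 'optimistic'),
--         ('hope', 'looking forward'),
--         ('hope', 'excited about'),
--         ('hope', "can't wait"),
--         ('hope', 'hopeful'),
--         ('stress', 'stressed'),
--         ('stress', 'overwhelmed'),
--         ('stress', 'pressure'),
--         ('stress', 'burden'),
--         ('stress', 'exhausted'),
--         ('stress', 'tired'),
--         ('stress', 'burned out')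
--     ]
--
--     tally = {}
--     for emotion, keyword in pairs:
--         if keyword in text_lower:
--             tally[emotion] = tally.get(emotion, 0) + 1
--
--     detected = []
--     for c in range(10, 0, -1):
--         for emotion, count in tally.items():
--             if count == c and len(detected) < 3:
--                 detected.append(emotion)
--
--     if not detected:
--         if sentiment_label == "POSITIVE":
--             detected.append('joy')
--         elif sentiment_label == "NEGATIVE":
--             detected.append('sadness')
--         else:
--             detected.append('neutral')
--
--     return detected
-- ===== Notes on version B (the rewrite author's own statement) =====
-- stated objective: alternative
-- what changed: The per-emotion counting loop and the sort-then-slice top-3 are both replaced: a flat (emotion, keyword) pair list is tallied into a counter dict in one pass, and since every count lies in 1..10 a counting-sort bucket scan over counts 10 down to 1 (capped at 3 picks) reproduces the stable descending order without sorting.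
import Mathlib
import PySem

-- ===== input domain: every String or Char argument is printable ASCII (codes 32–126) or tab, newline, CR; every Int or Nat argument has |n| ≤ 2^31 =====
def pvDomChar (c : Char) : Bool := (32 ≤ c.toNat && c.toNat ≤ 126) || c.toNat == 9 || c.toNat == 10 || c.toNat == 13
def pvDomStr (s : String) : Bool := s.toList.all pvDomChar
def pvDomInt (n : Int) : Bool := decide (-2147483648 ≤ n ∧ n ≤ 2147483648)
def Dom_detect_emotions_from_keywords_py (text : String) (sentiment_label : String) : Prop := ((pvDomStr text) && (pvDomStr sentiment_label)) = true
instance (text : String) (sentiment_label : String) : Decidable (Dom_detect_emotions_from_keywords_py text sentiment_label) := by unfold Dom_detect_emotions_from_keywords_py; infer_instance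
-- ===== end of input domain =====

-- B replaces A's per-emotion counting + sort-then-slice by a flat (emotion, keyword) pair list
-- tallied into a counter dict, then a counting-sort bucket scan over counts 10..1; objective: alternative.

-- ===== PORT A =====
def pvEmotionKeywords : List (String × List String) :=
  [("joy", ["happy", "joy", "excited", "wonderful", "amazing", "great", "love", "fantastic", "delighted", "thrilled"]),
   ("sadness", ["sad", "depressed", "unhappy", "down", "crying", "tears", "lonely", "miss", "disappointed", "heartbroken"]),
   ("anger", ["angry", "mad", "furious", "annoyed", "frustrated", "irritated", "hate", "rage", "outraged"]),
   ("fear", ["afraid", "scared", "anxious", "worried", "nervous", "panic", "terrified", "frightened"]),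
   ("surprise", ["surprised", "shocked", "amazed", "unexpected", "sudden", "wow", "astonished"]),
   ("gratitude", ["grateful", "thankful", "appreciate", "blessed", "lucky", "fortunate", "thanks"]),
   ("hope", ["hope", "optimistic", "looking forward", "excited about", "can't wait", "hopeful"]),
   ("stress", ["stressed", "overwhelmed", "pressure", "burden", "exhausted", "tired", "burned out"])]

-- count = sum(1 for keyword in keywords if keyword in text_lower)
def pvCount (tl : String) (kws : List String) : Int :=
  ((kws.filter (fun kw => PySem.Str.isIn kw tl)).map (fun _ => (1 : Int))).sum

-- the emotion_scores dict: its keys (the 8 emotion names) are distinct, so in insertion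
-- order it is exactly this list of pairs, and .items() iterates it as built
def pvScores (tl : String) : List (String × Int) :=
  pvEmotionKeywords.foldl
    (fun acc ek => if 0 < pvCount tl ek.2 then acc ++ [(ek.1, pvCount tl ek.2)] else acc) []

def detect_emotions_from_keywords_py (text : String) (sentiment_label : String) : List String :=
  -- if emotion_scores: detected = [e for e, _ in sorted(items, key=lambda x: x[1], reverse=True)[:3]]
  let detected :=
    if pvScores (PySem.Str.lower text) = [] then []
    else (PySem.List.slice (PySem.List.sorted (pvScores (PySem.Str.lower text)) (fun x => x.2) true)
            none (some (3 : Int))).map Prod.fst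
  -- if not detected: infer from sentiment
  if detected = [] then
    if sentiment_label == "POSITIVE" then ["joy"]
    else if sentiment_label == "NEGATIVE" then ["sadness"]
    else ["neutral"]
  else detected

-- ===== PORT B =====
def pvPairs : List (String × String) :=
  [("joy", "happy"),
   ("joy", "joy"),
   ("joy", "excited"),
   ("joy", "wonderful"),
   ("joy", "amazing"),
   ("joy", "great"),
   ("joy", "love"),
   ("joy", "fantastic"),
   ("joy", "delighted"),
   ("joy", "thrilled"),
   ("sadness", "sad"),
   ("sadness", "depressed"),
   ("sadness", "unhappy"),
   ("sadness", "down"),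
   ("sadness", "crying"),
   ("sadness", "tears"),
   ("sadness", "lonely"),
   ("sadness", "miss"),
   ("sadness", "disappointed"),
   ("sadness", "heartbroken"),
   ("anger", "angry"),
   ("anger", "mad"),
   ("anger", "furious"),
   ("anger", "annoyed"),
   ("anger", "frustrated"),
   ("anger", "irritated"),
   ("anger", "hate"),
   ("anger", "rage"),
   ("anger", "outraged"),
   ("fear", "afraid"),
   ("fear", "scared"),
   ("fear", "anxious"),
   ("fear", "worried"),
   ("fear", "nervous"),
   ("fear", "panic"),
   ("fear", "terrified"),
   ("fear", "frightened"),
   ("surprise", "surprised"),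
   ("surprise", "shocked"),
   ("surprise", "amazed"),
   ("surprise", "unexpected"),
   ("surprise", "sudden"),
   ("surprise", "wow"),
   ("surprise", "astonished"),
   ("gratitude", "grateful"),
   ("gratitude", "thankful"),
   ("gratitude", "appreciate"),
   ("gratitude", "blessed"),
   ("gratitude", "lucky"),
   ("gratitude", "fortunate"),
   ("gratitude", "thanks"),
   ("hope", "hope"),
   ("hope", "optimistic"),
   ("hope", "looking forward"),
   ("hope", "excited about"),
   ("hope", "can't wait"),
   ("hope", "hopeful"),
   ("stress", "stressed"),
   ("stress", "overwhelmed"),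
   ("stress", "pressure"),
   ("stress", "burden"),
   ("stress", "exhausted"),
   ("stress", "tired"),
   ("stress", "burned out")]

-- tally = {}; for emotion, keyword in pairs: if keyword in text_lower: tally[emotion] = tally.get(emotion, 0) + 1
def pvTally (tl : String) : PySem.Dict String Int :=
  pvPairs.foldl
    (fun d p => if PySem.Str.isIn p.2 tl then d.insert p.1 (d.getD p.1 0 + 1) else d)
    PySem.Dict.empty

def detect_emotions_from_keywords_py_alt (text : String) (sentiment_label : String) : List String :=
  -- for c in range(10, 0, -1): for emotion, count in tally.items(): if count == c and len(detected) < 3: append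
  let detected :=
    (PySem.List.pyRange 10 0 (-1)).foldl
      (fun acc c =>
        (pvTally (PySem.Str.lower text)).items.foldl
          (fun acc2 ec => if ec.2 == c && decide (acc2.length < 3) then acc2 ++ [ec.1] else acc2)
          acc)
      []
  -- if not detected: detected = ['joy' if … else 'sadness' if … else 'neutral']
  if detected = [] then
    [if sentiment_label == "POSITIVE" then "joy"
     else if sentiment_label == "NEGATIVE" then "sadness"
     else "neutral"]
  else detected

-- ===== PRECONDITION & SPEC =====
def Spec_detect_emotions_from_keywords_py (text : String) (sentiment_label : String) (out : List String) : Prop := out = detect_emotions_from_keywords_py_alt text sentiment_label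
instance (text : String) (sentiment_label : String) (out : List String) : Decidable (Spec_detect_emotions_from_keywords_py text sentiment_label out) := by unfold Spec_detect_emotions_from_keywords_py; infer_instance

-- ===== CLAIM (what is proved, stated in full; the proofs are below) =====
def Claim_equal_detect_emotions_from_keywords_py : Prop := ∀ (text : String) (sentiment_label : String), Dom_detect_emotions_from_keywords_py text sentiment_label → Spec_detect_emotions_from_keywords_py text sentiment_label (detect_emotions_from_keywords_py text sentiment_label)

-- ===== LEMMAS AND PROOFS =====

-- the loop body of pvTally, named for the proofs
def pvStep (tl : String) (d : PySem.Dict String Int) (p : String × String) : PySem.Dict String Int :=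
  if PySem.Str.isIn p.2 tl then d.insert p.1 (d.getD p.1 0 + 1) else d

-- pvCount is the number of matching keywords
theorem pv_count_eq (tl : String) (kws : List String) :
    pvCount tl kws = ((kws.filter (fun kw => PySem.Str.isIn kw tl)).length : Int) := by
  unfold pvCount
  rw [PySem.List.sum_map_const_int]
  ring

-- tallying one emotion's keyword pairs bumps that one key by its match count
theorem pv_fold_one (tl e : String) (kws : List String) : ∀ d : PySem.Dict String Int,
    (kws.map (fun kw => (e, kw))).foldl (pvStep tl) d
      = if (kws.filter (fun kw => PySem.Str.isIn kw tl)).length = 0 then d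
        else d.insert e (d.getD e 0 + ((kws.filter (fun kw => PySem.Str.isIn kw tl)).length : Int)) := by
  induction kws with
  | nil => intro d; simp
  | cons kw kws ih =>
      intro d
      by_cases hq : PySem.Str.isIn kw tl = true
      · have hf : (kw :: kws).filter (fun kw => PySem.Str.isIn kw tl)
            = kw :: kws.filter (fun kw => PySem.Str.isIn kw tl) := by
          simp only [List.filter_cons, hq, if_true]
        rw [List.map_cons, List.foldl_cons,
          show pvStep tl d (e, kw) = d.insert e (d.getD e 0 + 1) from by
            simp only [pvStep, hq, if_true],
          ih, hf, List.length_cons]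
        by_cases hc : (kws.filter (fun kw => PySem.Str.isIn kw tl)).length = 0
        · rw [if_pos hc, if_neg (by omega), hc]
          norm_num
        · rw [if_neg hc, if_neg (by omega), PySem.Dict.getD_insert_self, PySem.Dict.insert_insert_self]
          congr 1
          push_cast
          ring
      · have hqf : PySem.Str.isIn kw tl = false := by simpa using hq
        have hf : (kw :: kws).filter (fun kw => PySem.Str.isIn kw tl)
            = kws.filter (fun kw => PySem.Str.isIn kw tl) := by
          simp only [List.filter_cons, hqf, Bool.false_eq_true, if_false]
        rw [List.map_cons, List.foldl_cons,
          show pvStep tl d (e, kw) = d from by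
            simp only [pvStep, hqf, Bool.false_eq_true, if_false],
          hf]
        exact ih d

-- tallying group by group appends one (emotion, count) entry per emotion with a match
theorem pv_fold_groups (tl : String) : ∀ (groups : List (String × List String)) (d : PySem.Dict String Int),
    (groups.map (·.1)).Nodup → (∀ g ∈ groups, d.contains g.1 = false) →
    ((groups.flatMap (fun ek => ek.2.map (fun kw => (ek.1, kw)))).foldl (pvStep tl) d).items
      = d.items ++ (groups.filter (fun ek => decide (0 < pvCount tl ek.2))).map (fun ek => (ek.1, pvCount tl ek.2)) := by
  intro groups
  induction groups with
  | nil => intro d _ _; simp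
  | cons ek rest ih =>
      intro d hnd hdis
      have hnd' : (rest.map (·.1)).Nodup := (List.pairwise_cons.mp hnd).2
      have hhead : ∀ g ∈ rest, ek.1 ≠ g.1 := by
        intro g hg
        exact (List.pairwise_cons.mp hnd).1 g.1 (List.mem_map_of_mem hg)
      rw [List.flatMap_cons, List.foldl_append, pv_fold_one]
      by_cases hc : (ek.2.filter (fun kw => PySem.Str.isIn kw tl)).length = 0
      · rw [if_pos hc, ih d hnd' (fun g hg => hdis g (List.mem_cons_of_mem _ hg))]
        have : ¬ (0 < pvCount tl ek.2) := by rw [pv_count_eq, hc]; simp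
        rw [List.filter_cons_of_neg (by simpa using this)]
      · rw [if_neg hc]
        have hcon : d.contains ek.1 = false := hdis ek List.mem_cons_self
        have hget : d.getD ek.1 0 = 0 := PySem.Dict.getD_of_not_contains d 0 hcon
        rw [hget, zero_add]
        have hdis' : ∀ g ∈ rest, (d.insert ek.1 ((ek.2.filter (fun kw => PySem.Str.isIn kw tl)).length : Int)).contains g.1 = false := by
          intro g hg
          rw [PySem.Dict.contains_insert]
          simp [hdis g (List.mem_cons_of_mem _ hg), (hhead g hg).symm]
        rw [ih _ hnd' hdis', PySem.Dict.items_insert_of_not_contains _ _ hcon]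
        have hpos : 0 < pvCount tl ek.2 := by rw [pv_count_eq]; omega
        rw [List.filter_cons_of_pos (by simpa using hpos), List.map_cons, pv_count_eq]
        simp

-- the tally dict's items ARE A's emotion_scores list
theorem pv_items_eq (tl : String) : (pvTally tl).items = pvScores tl := by
  have hflat : pvPairs = pvEmotionKeywords.flatMap (fun ek => ek.2.map (fun kw => (ek.1, kw))) := by rfl
  have hstep : pvTally tl = (pvEmotionKeywords.flatMap (fun ek => ek.2.map (fun kw => (ek.1, kw)))).foldl (pvStep tl) PySem.Dict.empty := by
    rw [pvTally, hflat]; rfl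
  rw [hstep, pv_fold_groups tl pvEmotionKeywords PySem.Dict.empty (by decide)
      (fun g _ => PySem.Dict.contains_empty g.1)]
  unfold pvScores
  rw [PySem.List.foldl_append_ite]
  rfl

-- passing over a prefix none of whose elements x goes before
theorem pv_insertBy_append_left {α : Type} (before : α → α → Bool) (x : α) (bl rest : List α)
    (h : ∀ y ∈ bl, before x y = false) :
    PySem.List.insertBy before x (bl ++ rest) = bl ++ PySem.List.insertBy before x rest := by
  induction bl with
  | nil => rfl
  | cons b bl ih =>
      simp only [List.cons_append, PySem.List.insertBy, h b (List.mem_cons_self), Bool.false_eq_true,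
        if_false]
      have := ih (fun y hy => h y (List.mem_cons_of_mem _ hy))
      simp [this]

-- x goes before everything: it lands at the head
theorem pv_insertBy_all_before {α : Type} (before : α → α → Bool) (x : α) (rest : List α)
    (h : ∀ y ∈ rest, before x y = true) :
    PySem.List.insertBy before x rest = x :: rest := by
  cases rest with
  | nil => rfl
  | cons r rs => simp [PySem.List.insertBy, h r (List.mem_cons_self)]

-- inserting x (by descending key, Python's stable rule) into the bucket concatenation
theorem pv_insert_bucket (cs : List Int) (x : String × Int) (s : List (String × Int))
    (hmem : x.2 ∈ cs) (hdec : cs.Pairwise (· > ·)) :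
    PySem.List.insertBy (fun a b => decide (b.2 < a.2)) x
        (cs.flatMap (fun c => s.filter (fun y => y.2 == c)))
      = cs.flatMap (fun c => (s ++ [x]).filter (fun y => y.2 == c)) := by
  induction cs with
  | nil => simp at hmem
  | cons c cs ih =>
      have hlt : ∀ c' ∈ cs, c' < c := by
        intro c' hc'; exact (List.pairwise_cons.mp hdec).1 c' hc'
      have hdec' := (List.pairwise_cons.mp hdec).2
      have hrest : ∀ y ∈ cs.flatMap (fun c => s.filter (fun y => y.2 == c)), y.2 < c := by
        intro y hy
        rcases List.mem_flatMap.mp hy with ⟨c', hc', hyf⟩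
        have := List.of_mem_filter hyf
        have : y.2 = c' := by simpa using this
        rw [this]; exact hlt c' hc'
      by_cases hx : x.2 = c
      · have hbl : ∀ y ∈ s.filter (fun y => y.2 == c), (fun a b => decide (b.2 < a.2)) x y = false := by
          intro y hy
          have : y.2 = c := by simpa using List.of_mem_filter hy
          simp [this, hx]
        rw [List.flatMap_cons, pv_insertBy_append_left _ _ _ _ hbl,
          pv_insertBy_all_before _ _ _ (by intro y hy; simp [hrest y hy, hx])]
        rw [List.flatMap_cons]
        have h1 : (s ++ [x]).filter (fun y => y.2 == c) = s.filter (fun y => y.2 == c) ++ [x] := by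
          simp [List.filter_append, hx]
        have h2 : cs.flatMap (fun c => (s ++ [x]).filter (fun y => y.2 == c))
            = cs.flatMap (fun c => s.filter (fun y => y.2 == c)) := by
          apply List.flatMap_congr
          intro c' hc'
          have hne : ¬ (x.2 = c') := by have := hlt c' hc'; omega
          simp [List.filter_append, hne]
        rw [h1, h2]
        simp
      · have hx' : x.2 ∈ cs := by
          rcases List.mem_cons.mp hmem with h | h
          · exact absurd h hx
          · exact h
        have hxlt : x.2 < c := hlt _ hx'
        have hbl : ∀ y ∈ s.filter (fun y => y.2 == c), (fun a b => decide (b.2 < a.2)) x y = false := by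
          intro y hy
          have : y.2 = c := by simpa using List.of_mem_filter hy
          simp [this]; omega
        rw [List.flatMap_cons, pv_insertBy_append_left _ _ _ _ hbl, ih hx' hdec']
        rw [List.flatMap_cons]
        have h1 : (s ++ [x]).filter (fun y => y.2 == c) = s.filter (fun y => y.2 == c) := by
          simp [List.filter_append]; omega
        rw [h1]

-- Python's stable descending sort by count IS the bucket concatenation
theorem pv_sorted_eq_flatMap (cs : List Int) (hdec : cs.Pairwise (· > ·)) :
    ∀ s : List (String × Int), (∀ x ∈ s, x.2 ∈ cs) →
    PySem.List.sorted s (fun x => x.2) true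
      = cs.flatMap (fun c => s.filter (fun y => y.2 == c)) := by
  intro s
  induction s using List.reverseRecOn with
  | nil => intro _; simp [PySem.List.sorted]
  | append_singleton s x ih =>
      intro hall
      have h1 : PySem.List.sorted (s ++ [x]) (fun x => x.2) true
          = PySem.List.insertBy (fun a b => decide (b.2 < a.2)) x
              (PySem.List.sorted s (fun x => x.2) true) := by
        rw [PySem.List.sorted_rev_eq_foldl_insertBy, PySem.List.sorted_rev_eq_foldl_insertBy,
          List.foldl_append]
        rfl
      rw [h1, ih (fun y hy => hall y (List.mem_append_left _ hy))]
      exact pv_insert_bucket cs x s (hall x (List.mem_append_right _ (List.mem_singleton.mpr rfl))) hdec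

-- capped inner append loop = take 3 of the uncapped filtered append
theorem pv_inner_fold (c : Int) : ∀ (l : List (String × Int)) (acc : List String), acc.length ≤ 3 →
    l.foldl (fun acc2 ec => if ec.2 == c && decide (acc2.length < 3) then acc2 ++ [ec.1] else acc2) acc
      = (acc ++ (l.filter (fun y => y.2 == c)).map Prod.fst).take 3 := by
  intro l
  induction l with
  | nil =>
      intro acc h
      simp [List.take_of_length_le h]
  | cons y l ih =>
      intro acc h
      by_cases hc : y.2 = c
      · by_cases hlen : acc.length < 3
        · simp only [List.foldl_cons, hc, beq_self_eq_true, hlen, decide_true, Bool.and_self, if_true]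
          rw [ih (acc ++ [y.1]) (by simp; omega)]
          simp [hc]
        · have hlen3 : acc.length = 3 := by omega
          simp only [List.foldl_cons, hc, beq_self_eq_true, hlen, decide_false, Bool.and_false,
            Bool.false_eq_true, if_false]
          rw [ih acc h]
          simp [hlen3, hc]
      · have hcond : (y.2 == c && decide (acc.length < 3)) = false := by simp [hc]
        simp only [List.foldl_cons, hcond, Bool.false_eq_true, if_false]
        rw [ih acc h]
        simp [hc]

-- (take 3 l ++ zs).take 3 = (l ++ zs).take 3
theorem pv_take_take_append {α : Type} (l zs : List α) :
    ((l.take 3) ++ zs).take 3 = (l ++ zs).take 3 := by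
  rw [List.take_append, List.take_append, List.take_take]
  simp only [List.length_take]
  congr 2
  omega

-- capped outer loop over the buckets = take 3 of the full bucket concatenation
theorem pv_outer_fold (cs : List Int) (s : List (String × Int)) :
    ∀ acc : List String, acc.length ≤ 3 →
    cs.foldl
        (fun acc c =>
          s.foldl (fun acc2 ec => if ec.2 == c && decide (acc2.length < 3) then acc2 ++ [ec.1] else acc2) acc)
        acc
      = (acc ++ cs.flatMap (fun c => (s.filter (fun y => y.2 == c)).map Prod.fst)).take 3 := by
  induction cs with
  | nil =>
      intro acc h
      simp [List.take_of_length_le, h]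
  | cons c cs ih =>
      intro acc h
      simp only [List.foldl_cons]
      rw [pv_inner_fold c s acc h,
        ih _ (by rw [List.length_take]; omega)]
      rw [List.flatMap_cons, ← List.append_assoc]
      exact pv_take_take_append _ _

-- every score is a count in 1..10
theorem pv_scores_mem (tl : String) : ∀ x ∈ pvScores tl, 1 ≤ x.2 ∧ x.2 ≤ 10 := by
  intro x hx
  unfold pvScores at hx
  rw [show (fun (acc : List (String × Int)) (ek : String × List String) =>
        if 0 < pvCount tl ek.2 then acc ++ [(ek.1, pvCount tl ek.2)] else acc)
      = (fun acc ek => if (decide (0 < pvCount tl ek.2)) = true then acc ++ [(ek.1, pvCount tl ek.2)] else acc)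
      from by funext acc ek; simp,
    PySem.List.foldl_append_if] at hx
  simp only [List.nil_append, List.mem_map, List.mem_filter] at hx
  rcases hx with ⟨ek, ⟨hmem, hpos⟩, rfl⟩
  have hpos' : 0 < pvCount tl ek.2 := by simpa using hpos
  have hlen : (ek.2.length : Int) ≤ 10 := by
    fin_cases hmem <;> simp
  have hle : pvCount tl ek.2 ≤ (ek.2.length : Int) := by
    unfold pvCount
    rw [PySem.List.sum_map_const_int]
    have := List.length_filter_le (fun kw => PySem.Str.isIn kw tl) ek.2
    simp only [mul_one]
    exact_mod_cast this
  exact ⟨by omega, by omega⟩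

-- A's sort-then-slice detected list = B's bucket-scan detected list
theorem pv_main (tl : String) :
    (if pvScores tl = [] then []
     else (PySem.List.slice (PySem.List.sorted (pvScores tl) (fun x => x.2) true) none (some (3 : Int))).map Prod.fst)
    = (PySem.List.pyRange 10 0 (-1)).foldl
        (fun acc c =>
          (pvScores tl).foldl
            (fun acc2 ec => if ec.2 == c && decide (acc2.length < 3) then acc2 ++ [ec.1] else acc2)
            acc)
        [] := by
  have hrange : PySem.List.pyRange 10 0 (-1) = [10, 9, 8, 7, 6, 5, 4, 3, 2, 1] := by decide
  have hdec : ([10, 9, 8, 7, 6, 5, 4, 3, 2, 1] : List Int).Pairwise (· > ·) := by decide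
  have hmem : ∀ x ∈ pvScores tl, x.2 ∈ ([10, 9, 8, 7, 6, 5, 4, 3, 2, 1] : List Int) := by
    intro x hx
    have := pv_scores_mem tl x hx
    simp only [List.mem_cons, List.not_mem_nil, or_false]
    omega
  rw [hrange, pv_outer_fold _ _ [] (by simp), List.nil_append]
  by_cases hnil : pvScores tl = []
  · simp [hnil]
  · have hslice : PySem.List.slice (PySem.List.sorted (pvScores tl) (fun x => x.2) true) none (some (3 : Int))
        = (PySem.List.sorted (pvScores tl) (fun x => x.2) true).take 3 := by
      simp [pysem]
    rw [if_neg hnil, hslice]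
    rw [pv_sorted_eq_flatMap _ hdec _ hmem]
    rw [List.map_take, List.map_flatMap]

-- the two fallback expressions agree
theorem pv_fallback_eq (s : String) :
    (if s == "POSITIVE" then ["joy"] else if s == "NEGATIVE" then ["sadness"] else ["neutral"])
      = [if s == "POSITIVE" then "joy" else if s == "NEGATIVE" then "sadness" else "neutral"] := by
  split_ifs <;> rfl

-- ===== VERDICT (by name: the statement is the Claim_ definition above) =====
theorem detect_emotions_from_keywords_py_spec : Claim_equal_detect_emotions_from_keywords_py := by
  intro text sentiment_label _
  unfold Spec_detect_emotions_from_keywords_py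
  unfold detect_emotions_from_keywords_py detect_emotions_from_keywords_py_alt
  rw [pv_items_eq, ← pv_main (PySem.Str.lower text), pv_fallback_eq]
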